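-- pv_equiv track=rewrite | github.com/LichengXX/Caps_pipeline | 01_caps.py | detect_caps
-- ===== SOURCE A (Python) =====
-- def detect_caps(ref_seq, alt_seq, enzymes, flank_len):
--     results   = []
--     snp_index = flank_len
--     for name, (site, offset) in enzymes.items():
--         L = len(site)
--         ref_cuts = {
--             i+offset for i in range(len(ref_seq)-L+1)
--             if ref_seq[i:i+L] == site
--                and i <= snp_index < i+L
--         }
--
--         alt_cuts = {
--             i+offset for i in range(len(alt_seq)-L+1)
--             if alt_seq[i:i+L] == site
--                and i <= snp_index < i+L
--         }
--
--         if ref_cuts and not alt_cuts: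
--             results.append((name, 'loss'))
--
--         elif alt_cuts and not ref_cuts:
--             results.append((name, 'gain'))
--     return results
-- ===== SOURCE B (Python) =====
-- def detect_caps(ref_seq, alt_seq, enzymes, flank_len):
--     # Only window offsets i in [flank_len-L+1, flank_len] (clamped to the valid
--     # start range) can overlap the SNP position, so test just those L positions.
--     def cut_near_snp(seq, site):
--         L = len(site)
--         lo = max(0, flank_len - L + 1)
--         hi = min(len(seq) - L, flank_len)
--         return any(seq.startswith(site, i) for i in range(lo, hi + 1))
--
--     results = []
--     for name, (site, _offset) in enzymes.items():
--         r = cut_near_snp(ref_seq, site)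
--         a = cut_near_snp(alt_seq, site)
--         if r != a:
--             results.append((name, 'loss' if r else 'gain'))
--     return results
-- ===== Notes on version B (the rewrite author's own statement) =====
-- stated objective: faster
-- what changed: Instead of scanning every start position of both sequences and building the cut-position sets, B tests only the at most L start offsets that can overlap the SNP (the window [flank_len-L+1, flank_len] clamped to the valid range) and checks mere existence of a match, since only set emptiness decides gain/loss.
import Mathlib
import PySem

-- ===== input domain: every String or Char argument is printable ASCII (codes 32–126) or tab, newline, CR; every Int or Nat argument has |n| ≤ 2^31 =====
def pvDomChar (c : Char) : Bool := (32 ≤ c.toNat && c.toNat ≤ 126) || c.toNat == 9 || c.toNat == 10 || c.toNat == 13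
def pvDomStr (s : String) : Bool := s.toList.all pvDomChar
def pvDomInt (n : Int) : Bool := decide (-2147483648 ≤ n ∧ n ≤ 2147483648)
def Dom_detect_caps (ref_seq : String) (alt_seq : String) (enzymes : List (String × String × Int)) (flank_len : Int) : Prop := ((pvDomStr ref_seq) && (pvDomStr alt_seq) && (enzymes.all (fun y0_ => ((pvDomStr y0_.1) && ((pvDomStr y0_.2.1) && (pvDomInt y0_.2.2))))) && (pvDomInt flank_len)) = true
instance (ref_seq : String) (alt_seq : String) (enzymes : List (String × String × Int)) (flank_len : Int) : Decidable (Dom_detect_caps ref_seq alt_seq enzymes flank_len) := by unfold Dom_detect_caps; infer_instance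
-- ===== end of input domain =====

-- B only checks the ≤ L window of match offsets that can overlap the SNP (and only
-- whether a match exists, since only set emptiness matters), instead of scanning the
-- whole sequence and building the cut-position sets.  Objective: faster (asymptotic).

-- ===== PORT A =====
-- the set comprehension {i+offset for i in range(len(seq)-L+1) if seq[i:i+L]==site and i<=snp<i+L}
def pvCutsA (seq site : String) (snp offset : Int) : PySem.Set Int :=
  (PySem.List.pyRange 0 ((seq.toList.length : Int) - (site.toList.length : Int) + 1) 1).foldl
    (fun s i =>
      if PySem.Str.slice seq (some i) (some (i + (site.toList.length : Int))) = site
           ∧ i ≤ snp ∧ snp < i + (site.toList.length : Int)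
      then PySem.Set.add s (i + offset) else s)
    PySem.Set.empty

def detect_caps (ref_seq : String) (alt_seq : String) (enzymes : List (String × String × Int)) (flank_len : Int) : List (String × String) :=
  -- enzymes arrives as a Python dict: iteration = insertion order with unique keys
  (PySem.Dict.ofList enzymes).items.foldl
    (fun results e =>
      let refCuts := pvCutsA ref_seq e.2.1 flank_len e.2.2
      let altCuts := pvCutsA alt_seq e.2.1 flank_len e.2.2
      if refCuts ≠ [] ∧ altCuts = [] then results ++ [(e.1, "loss")]
      else if altCuts ≠ [] ∧ refCuts = [] then results ++ [(e.1, "gain")]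
      else results)
    []

-- ===== PORT B =====
-- any(seq.startswith(site, i) for i in range(max(0, flank-L+1), min(len(seq)-L, flank)+1));
-- seq.startswith(site, i) with 0 ≤ i is exactly site.toList.isPrefixOf (seq.toList.drop i.toNat)
def pvHitB (seq site : String) (flank : Int) : Bool :=
  let L : Int := (site.toList.length : Int)
  let lo : Int := max 0 (flank - L + 1)
  let hi : Int := min ((seq.toList.length : Int) - L) flank
  (PySem.List.pyRange lo (hi + 1) 1).any
    (fun i => site.toList.isPrefixOf (seq.toList.drop i.toNat))

def detect_caps_alt (ref_seq : String) (alt_seq : String) (enzymes : List (String × String × Int)) (flank_len : Int) : List (String × String) :=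
  (PySem.Dict.ofList enzymes).items.foldl
    (fun results e =>
      let r := pvHitB ref_seq e.2.1 flank_len
      let a := pvHitB alt_seq e.2.1 flank_len
      if r ≠ a then results ++ [(e.1, if r then "loss" else "gain")] else results)
    []

-- ===== PRECONDITION & SPEC =====
def Spec_detect_caps (ref_seq : String) (alt_seq : String) (enzymes : List (String × String × Int)) (flank_len : Int) (out : List (String × String)) : Prop := out = detect_caps_alt ref_seq alt_seq enzymes flank_len
instance (ref_seq : String) (alt_seq : String) (enzymes : List (String × String × Int)) (flank_len : Int) (out : List (String × String)) : Decidable (Spec_detect_caps ref_seq alt_seq enzymes flank_len out) := by unfold Spec_detect_caps; infer_instance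

-- ===== CLAIM (what is proved, stated in full; the proofs are below) =====
def Claim_equal_detect_caps : Prop := ∀ (ref_seq : String) (alt_seq : String) (enzymes : List (String × String × Int)) (flank_len : Int), Dom_detect_caps ref_seq alt_seq enzymes flank_len → Spec_detect_caps ref_seq alt_seq enzymes flank_len (detect_caps ref_seq alt_seq enzymes flank_len)

-- ===== LEMMAS AND PROOFS =====

lemma chars_slice_eq (xs : List Char) (a b : Option Int) :
    PySem.Chars.slice xs a b = PySem.List.slice xs a b := rfl

lemma set_add_ne_nil (s : PySem.Set Int) (x : Int) : PySem.Set.add s x ≠ [] := by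
  cases s with
  | nil => simp [PySem.Set.add, PySem.Set.contains]
  | cons h t => simp only [PySem.Set.add]; split <;> simp

lemma foldl_add_eq_nil (l : List Int) (p : Int → Prop) [DecidablePred p] (f : Int → Int)
    (s0 : PySem.Set Int) :
    (l.foldl (fun s i => if p i then PySem.Set.add s (f i) else s) s0 = []) ↔
      (s0 = [] ∧ ∀ i ∈ l, ¬ p i) := by
  induction l generalizing s0 with
  | nil => simp
  | cons a t ih =>
    simp only [List.foldl_cons, ih, List.mem_cons]
    constructor
    · rintro ⟨h1, h2⟩
      by_cases hp : p a
      · exact absurd h1 (by simp [hp, set_add_ne_nil])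
      · simp [hp] at h1
        exact ⟨h1, by rintro i (rfl | hi) <;> [exact hp; exact h2 i hi]⟩
    · rintro ⟨h1, h2⟩
      have hpa : ¬ p a := h2 a (Or.inl rfl)
      exact ⟨by simp [hpa, h1], fun i hi => h2 i (Or.inr hi)⟩

lemma cuts_ne_nil_iff (seq site : String) (snp offset : Int) :
    (pvCutsA seq site snp offset ≠ []) ↔ pvHitB seq site snp = true := by
  unfold pvCutsA pvHitB
  rw [Ne, foldl_add_eq_nil]
  simp only [PySem.Set.empty, List.any_eq_true, PySem.List.mem_pyRange_one, true_and,
    not_forall, Classical.not_not]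
  constructor
  · rintro ⟨i, hi, hsl, h1, h2⟩
    refine ⟨i, by omega, ?_⟩
    have h0 : (0 : Int) ≤ i := hi.1
    have hL : (0 : Int) ≤ (site.toList.length : Int) := by positivity
    have : (PySem.Str.slice seq (some i) (some (i + (site.toList.length : Int)))).toList = site.toList := by
      rw [hsl]
    rw [PySem.Str.toList_slice, chars_slice_eq, PySem.List.slice_toNat _ h0 (by omega)] at this
    have ht : ((i + (site.toList.length : Int)).toNat - i.toNat) = site.toList.length := by omega
    rw [ht] at this
    rw [List.isPrefixOf_iff_prefix, List.prefix_iff_eq_take]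
    exact this.symm
  · rintro ⟨i, hi, hpre⟩
    have h0 : (0 : Int) ≤ i := le_trans (le_max_left 0 _) hi.1
    have hL : (0 : Int) ≤ (site.toList.length : Int) := by positivity
    refine ⟨i, by omega, ?_, by omega, by omega⟩
    · rw [List.isPrefixOf_iff_prefix, List.prefix_iff_eq_take] at hpre
      rw [← String.toList_inj]
      rw [PySem.Str.toList_slice, chars_slice_eq, PySem.List.slice_toNat _ h0 (by omega)]
      have ht : ((i + (site.toList.length : Int)).toNat - i.toNat) = site.toList.length := by omega
      rw [ht]
      exact hpre.symm

lemma step_eq (ref_seq alt_seq : String) (flank_len : Int)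
    (results : List (String × String)) (e : String × String × Int) :
    (let refCuts := pvCutsA ref_seq e.2.1 flank_len e.2.2
     let altCuts := pvCutsA alt_seq e.2.1 flank_len e.2.2
     if refCuts ≠ [] ∧ altCuts = [] then results ++ [(e.1, "loss")]
     else if altCuts ≠ [] ∧ refCuts = [] then results ++ [(e.1, "gain")]
     else results) =
    (let r := pvHitB ref_seq e.2.1 flank_len
     let a := pvHitB alt_seq e.2.1 flank_len
     if r ≠ a then results ++ [(e.1, if r then "loss" else "gain")] else results) := by
  have hr := cuts_ne_nil_iff ref_seq e.2.1 flank_len e.2.2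
  have ha := cuts_ne_nil_iff alt_seq e.2.1 flank_len e.2.2
  simp only []
  cases hR : pvHitB ref_seq e.2.1 flank_len <;> cases hA : pvHitB alt_seq e.2.1 flank_len <;>
    rw [hR] at hr <;> rw [hA] at ha <;> simp at hr ha ⊢ <;>
    simp [hr, ha]

-- ===== VERDICT (by name: the statement is the Claim_ definition above) =====
theorem detect_caps_spec : Claim_equal_detect_caps := by
  intro ref_seq alt_seq enzymes flank_len _
  unfold Spec_detect_caps detect_caps detect_caps_alt
  congr 1
  funext results e
  exact step_eq ref_seq alt_seq flank_len results e
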